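-- pv_equiv track=rewrite | github.com/montreal91/workshop | ap/codeforces/for_tutorials/problem1121.py | calculate_invited_kids
-- ===== SOURCE A (Python) =====
-- def calculate_invited_kids(sweets):
--     combos = {}
--     for i in range(len(sweets) - 1):
--         for j in range(i + 1, len(sweets)):
--             combo = sweets[i] + sweets[j]
--             combos.setdefault(combo, 0)
--             combos[combo] += 1
--     return max(combos.values())
-- ===== SOURCE B (Python) =====
-- def calculate_invited_kids(sweets):
--     n = len(sweets)
--     sums = sorted(sweets[i] + sweets[j] for i in range(n - 1) for j in range(i + 1, n))
--     best = 0
--     run = 0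
--     prev = None
--     for s in sums:
--         if prev is not None and s == prev:
--             run += 1
--         else:
--             run = 1
--             prev = s
--         if run > best:
--             best = run
--     return best
-- ===== Notes on version B (the rewrite author's own statement) =====
-- stated objective: alternative
-- what changed: B replaces A's hash-dict frequency counting of pair sums by sort-then-scan: it materialises all pairwise sums, sorts them, and finds the longest run of equal values in one linear scan; no dictionary is built.
import Mathlib
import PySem

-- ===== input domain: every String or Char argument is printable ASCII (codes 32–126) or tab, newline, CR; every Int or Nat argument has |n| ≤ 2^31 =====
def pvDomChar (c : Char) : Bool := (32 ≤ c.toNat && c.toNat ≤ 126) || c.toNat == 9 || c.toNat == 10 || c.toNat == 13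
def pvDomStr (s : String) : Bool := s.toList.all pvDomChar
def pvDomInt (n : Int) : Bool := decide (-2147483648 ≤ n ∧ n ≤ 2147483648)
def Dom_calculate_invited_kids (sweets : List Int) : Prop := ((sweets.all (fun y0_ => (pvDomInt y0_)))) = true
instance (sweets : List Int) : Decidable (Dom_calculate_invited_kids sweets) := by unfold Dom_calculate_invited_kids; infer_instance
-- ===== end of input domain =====

-- B replaces A's dict-based frequency counting of pairwise sums by sort-then-scan
-- (sort all pair sums, take the longest run of equal values); an alternative algorithm of similar cost.


-- ===== PORT A =====
def calculate_invited_kids (sweets : List Int) : Int :=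
  let combos : PySem.Dict Int Int :=
    (PySem.List.pyRange 0 ((sweets.length : Int) - 1) 1).foldl (fun combos i =>
      (PySem.List.pyRange (i + 1) (sweets.length : Int) 1).foldl (fun combos j =>
        let combo := PySem.List.pyGetD sweets i 0 + PySem.List.pyGetD sweets j 0
        let combos := combos.setdefault combo 0
        combos.modify combo 0 (· + 1)) combos) PySem.Dict.empty
  -- Python's max(...) raises on an empty dict; Pre_ excludes that, so the .getD 0 default is never taken
  (PySem.List.max? combos.values (fun x => x)).getD 0

-- ===== PORT B =====
-- one step of Source B's run-length scan; state = (best, run, prev)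
def pvRunStep (st : Int × Int × Option Int) (s : Int) : Int × Int × Option Int :=
  let best := st.1; let run := st.2.1; let prev := st.2.2
  let p : Int × Option Int :=
    match prev with
    | some p => if s = p then (run + 1, some p) else (1, some s)
    | none => (1, some s)
  (if p.1 > best then p.1 else best, p.1, p.2)

def calculate_invited_kids_alt (sweets : List Int) : Int :=
  let n : Int := sweets.length
  let sums := PySem.List.sorted
    ((PySem.List.pyRange 0 (n - 1) 1).flatMap fun i =>
      (PySem.List.pyRange (i + 1) n 1).map fun j =>
        PySem.List.pyGetD sweets i 0 + PySem.List.pyGetD sweets j 0)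
    (fun x => x) false
  (sums.foldl pvRunStep (0, 0, none)).1

-- ===== PRECONDITION & SPEC =====
-- Pre_ excludes lists with fewer than two elements, on which Python A raises ValueError (max() of an empty sequence)
def Pre_calculate_invited_kids (sweets : List Int) : Prop := 2 ≤ sweets.length
instance (sweets : List Int) : Decidable (Pre_calculate_invited_kids sweets) := by unfold Pre_calculate_invited_kids; infer_instance
def pvWitness_calculate_invited_kids : List Int := [1, 2, 3, 3]

def Spec_calculate_invited_kids (sweets : List Int) (out : Int) : Prop := out = calculate_invited_kids_alt sweets
instance (sweets : List Int) (out : Int) : Decidable (Spec_calculate_invited_kids sweets out) := by unfold Spec_calculate_invited_kids; infer_instance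

-- ===== CLAIM (what is proved, stated in full; the proofs are below) =====
def Claim_equal_calculate_invited_kids : Prop := ∀ (sweets : List Int), Dom_calculate_invited_kids sweets → Pre_calculate_invited_kids sweets → Spec_calculate_invited_kids sweets (calculate_invited_kids sweets)

-- ===== LEMMAS AND PROOFS =====

-- the list of all pairwise sums, in the common enumeration order of both programs
def pvPairSums (sweets : List Int) : List Int :=
  (PySem.List.pyRange 0 ((sweets.length : Int) - 1) 1).flatMap fun i =>
    (PySem.List.pyRange (i + 1) (sweets.length : Int) 1).map fun j =>
      PySem.List.pyGetD sweets i 0 + PySem.List.pyGetD sweets j 0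

-- ---- A-side: the dict A builds is the counter of pvPairSums ----

lemma pvBodyEq (d : PySem.Dict Int Int) (k : Int) :
    (d.setdefault k 0).modify k 0 (· + 1) = d.insert k (d.getD k 0 + 1) := by
  by_cases h : d.contains k = true
  · rw [PySem.Dict.setdefault_of_contains d 0 h]
    simp [PySem.Dict.modify]
  · have h0 : d.getD k 0 = 0 := PySem.Dict.getD_of_not_contains d 0 (by simpa using h)
    rw [PySem.Dict.setdefault_of_not_contains d 0 (by simpa using h), h0]
    simp [PySem.Dict.modify, PySem.Dict.getD_insert_self, PySem.Dict.insert_insert_self]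

lemma pvA_eq (sweets : List Int) :
    calculate_invited_kids sweets =
      (PySem.List.max? ((PySem.Set.ofList (pvPairSums sweets)).map
        (fun k => ((pvPairSums sweets).count k : Int))) (fun x => x)).getD 0 := by
  have h1 : (PySem.List.pyRange 0 ((sweets.length : Int) - 1) 1).foldl (fun combos i =>
      (PySem.List.pyRange (i + 1) (sweets.length : Int) 1).foldl (fun combos j =>
        let combo := PySem.List.pyGetD sweets i 0 + PySem.List.pyGetD sweets j 0
        let combos := combos.setdefault combo 0
        combos.modify combo 0 (· + 1)) combos) (PySem.Dict.empty : PySem.Dict Int Int) =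
      (pvPairSums sweets).foldl (fun d x => d.insert x (d.getD x 0 + 1)) PySem.Dict.empty := by
    rw [pvPairSums, List.foldl_flatMap]
    refine PySem.List.foldl_congr_mem _ _ _ _ (fun acc i hi => ?_)
    rw [List.foldl_map]
    exact PySem.List.foldl_congr_mem _ _ _ _ (fun acc2 j hj =>
      pvBodyEq acc2 (PySem.List.pyGetD sweets i 0 + PySem.List.pyGetD sweets j 0))
  refine Eq.trans (congrArg (fun d : PySem.Dict Int Int =>
    (PySem.List.max? d.values (fun x => x)).getD 0) h1) ?_
  set L := pvPairSums sweets with hL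
  set df := L.foldl (fun d x => d.insert x (d.getD x 0 + 1)) (PySem.Dict.empty : PySem.Dict Int Int) with hdf
  have hnd : df.keys.Nodup := PySem.Dict.nodup_keys_foldl_insert _ _ _ PySem.Dict.nodup_keys_empty
  have hkeys : df.keys = PySem.Set.ofList L := by
    rw [hdf, PySem.Dict.keys_foldl_insert]
    rfl
  have hvals : df.values = (PySem.Set.ofList L).map (fun k => (L.count k : Int)) := by
    rw [PySem.Dict.values_eq_map_keys df hnd 0, hkeys]
    refine List.map_congr_left (fun k hk => ?_)
    rw [hdf, PySem.Dict.getD_foldl_insert_add_one, PySem.Dict.getD_empty]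
    ring
  simp only []
  rw [hvals]

-- ---- B-side: the run-length scan over a sorted list computes the maximal multiplicity ----

lemma pvStep_same (b r : Int) (a : Int) :
    pvRunStep (b, r, some a) a = (if r + 1 > b then r + 1 else b, r + 1, some a) := by
  simp [pvRunStep]

lemma pvStep_new (b r : Int) (prev : Option Int) (a : Int) (h : prev ≠ some a) :
    pvRunStep (b, r, prev) a = (if 1 > b then 1 else b, 1, some a) := by
  cases prev with
  | none => simp [pvRunStep]
  | some p =>
    have : a ≠ p := by rintro rfl; exact h rfl
    simp [pvRunStep, this]

lemma pvScan_replicate (t : Nat) (a b r : Int) (h : r ≤ b) :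
    (List.replicate t a).foldl pvRunStep (b, r, some a) = (max b (r + t), r + t, some a) := by
  induction t generalizing b r with
  | zero => simp; omega
  | succ t ih =>
    rw [List.replicate_succ, List.foldl_cons, pvStep_same]
    have h1 : (r + 1) ≤ if r + 1 > b then r + 1 else b := by omega
    rw [ih _ _ h1]
    refine Prod.ext ?_ (Prod.ext ?_ rfl) <;> simp <;> omega

lemma pvDropWhile_head_false (p : Int → Bool) (l : List Int) (x : Int) (xs : List Int)
    (h : l.dropWhile p = x :: xs) : p x = false := by
  induction l with
  | nil => simp at h
  | cons c cs ih =>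
    rw [List.dropWhile_cons] at h
    split at h
    · exact ih h
    · next hpc => cases h; simpa using hpc

lemma pvScan_sorted (S : List Int) (hs : List.Pairwise (· ≤ ·) S)
    (b r : Int) (prev : Option Int) (hprev : ∀ x ∈ S, prev ≠ some x) (hb : 0 ≤ b) :
    b ≤ (S.foldl pvRunStep (b, r, prev)).1 ∧
    (∀ k ∈ S, (S.count k : Int) ≤ (S.foldl pvRunStep (b, r, prev)).1) ∧
    ((S.foldl pvRunStep (b, r, prev)).1 = b ∨
      ∃ k ∈ S, (S.count k : Int) = (S.foldl pvRunStep (b, r, prev)).1) := by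
  induction hn : S.length using Nat.strong_induction_on generalizing S b r prev with
  | _ n IH =>
  subst hn
  cases hS : S with
  | nil => exact ⟨le_refl _, by simp, Or.inl rfl⟩
  | cons a tl =>
  subst hS
  set p : Int → Bool := fun x => x == a with hp
  set W := List.takeWhile p (a :: tl) with hW
  set T := List.dropWhile p (a :: tl) with hT
  have hWT : W ++ T = a :: tl := List.takeWhile_append_dropWhile
  have hWrep : W = List.replicate W.length a :=
    List.eq_replicate_of_mem (fun x hx => by simpa [hp] using List.mem_takeWhile_imp hx)
  have hWlen : 1 ≤ W.length := by
    rw [hW, hp]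
    simp
  have hTgt : ∀ x ∈ T, a < x := by
    intro x hx
    have hle : a ≤ x := by
      rw [← hWT] at hs
      have := (List.pairwise_append.mp hs).2.2
      refine this a ?_ x hx
      rw [hWrep]
      exact List.mem_replicate.mpr ⟨by omega, rfl⟩
    rcases eq_or_ne x a with heq | hne
    · exfalso
      rw [heq] at hx
      cases hT' : T with
      | nil => rw [hT'] at hx; simp at hx
      | cons t ts =>
        have hpt : p t = false := pvDropWhile_head_false p (a :: tl) t ts (by rw [← hT, hT'])
        have hta : t ≠ a := by simpa [hp] using hpt
        have hTs : List.Pairwise (· ≤ ·) T := hs.sublist (by rw [hT]; exact List.dropWhile_sublist p)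
        rw [hT'] at hx hTs
        rcases List.mem_cons.mp hx with rfl | hx'
        · exact hta rfl
        · have h1 : t ≤ a := (List.pairwise_cons.mp hTs).1 a hx'
          have hat : a ≤ t := by
            rw [← hWT] at hs
            have := (List.pairwise_append.mp hs).2.2
            refine this a ?_ t (by rw [hT']; exact List.mem_cons_self ..)
            rw [hWrep]; exact List.mem_replicate.mpr ⟨by omega, rfl⟩
          exact hta (le_antisymm h1 hat)
    · exact lt_of_le_of_ne hle (Ne.symm hne)
  have haT : a ∉ T := fun hx => lt_irrefl a (hTgt a hx)
  have hWcons : W = a :: List.replicate (W.length - 1) a := by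
    conv_lhs => rw [hWrep]
    cases hWl : W.length with
    | zero => omega
    | succ k => simp [List.replicate_succ]
  have hprev_a : prev ≠ some a := hprev a (List.mem_cons_self ..)
  set b1 : Int := if 1 > b then 1 else b with hb1
  have hb1m : b1 = max b 1 := by rw [hb1]; split <;> omega
  have hfoldW : W.foldl pvRunStep (b, r, prev) =
      (max b1 (W.length : Int), (W.length : Int), some a) := by
    have h1 : W.foldl pvRunStep (b, r, prev) =
        (a :: List.replicate (W.length - 1) a).foldl pvRunStep (b, r, prev) := by
      rw [← hWcons]
    rw [h1, List.foldl_cons, pvStep_new _ _ _ _ hprev_a, ← hb1,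
      pvScan_replicate _ _ _ _ (by omega)]
    have h2 : (1 : Int) + ((W.length - 1 : Nat) : Int) = (W.length : Int) := by
      push_cast [Nat.cast_sub hWlen]; ring
    rw [h2]
  have hTlen : T.length < (a :: tl).length := by
    have h2 : W.length + T.length = (a :: tl).length := by
      rw [← hWT]; simp
    omega
  have hTs : List.Pairwise (· ≤ ·) T := hs.sublist (by rw [hT]; exact List.dropWhile_sublist p)
  have hprevT : ∀ x ∈ T, (some a : Option Int) ≠ some x := by
    intro x hx h; cases h; exact haT hx
  have hb1nn : (0:Int) ≤ max b1 (W.length : Int) := by omega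
  obtain ⟨ih1, ih2, ih3⟩ := IH T.length hTlen T hTs (max b1 (W.length : Int)) (W.length : Int)
    (some a) hprevT hb1nn rfl
  have hfold : (a :: tl).foldl pvRunStep (b, r, prev) =
      T.foldl pvRunStep (max b1 (W.length : Int), (W.length : Int), some a) := by
    rw [← hWT, List.foldl_append, hfoldW]
  have hcount : ∀ k : Int, (a :: tl).count k = W.count k + T.count k := by
    intro k; rw [← hWT, List.count_append]
  have hcountW : ∀ k : Int, W.count k = if k = a then W.length else 0 := by
    intro k
    rw [hWrep, List.count_replicate]
    by_cases h : k = a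
    · subst h; simp
    · simp [h, Ne.symm h]
  have hcountTa : T.count a = 0 := List.count_eq_zero.mpr haT
  rw [hfold]
  refine ⟨by omega, ?_, ?_⟩
  · intro k hk
    rw [← hWT] at hk
    rcases List.mem_append.mp hk with hkW | hkT
    · have hka : k = a := by
        have := List.mem_takeWhile_imp (by rw [← hW]; exact hkW)
        simpa [hp] using this
      subst hka
      rw [hcount, hcountW, hcountTa, if_pos rfl]
      push_cast
      omega
    · have hka : k ≠ a := fun h => haT (h ▸ hkT)
      have h3 := ih2 k hkT
      rw [hcount, hcountW, if_neg hka]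
      push_cast
      omega
  · rcases ih3 with hR1 | ⟨k, hkT, hkc⟩
    · by_cases hRb : (T.foldl pvRunStep (max b1 (W.length : Int), (W.length : Int), some a)).1 = b
      · exact Or.inl hRb
      · right
        refine ⟨a, List.mem_cons_self .., ?_⟩
        rw [hcount, hcountW, hcountTa, if_pos rfl]
        push_cast
        omega
    · right
      have hka : k ≠ a := fun h => haT (h ▸ hkT)
      refine ⟨k, by rw [← hWT]; exact List.mem_append.mpr (Or.inr hkT), ?_⟩
      rw [hcount, hcountW, if_neg hka]
      push_cast
      omega

lemma pvAlt_def (sweets : List Int) :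
    calculate_invited_kids_alt sweets =
      ((PySem.List.sorted (pvPairSums sweets) (fun x => x) false).foldl
        pvRunStep (0, 0, none)).1 := rfl

lemma pvPairSums_ne_nil (sweets : List Int) (h : 2 ≤ sweets.length) :
    pvPairSums sweets ≠ [] := by
  have h0 : (PySem.List.pyGetD sweets 0 0 + PySem.List.pyGetD sweets 1 0) ∈ pvPairSums sweets := by
    rw [pvPairSums]
    refine List.mem_flatMap.mpr ⟨0, ?_, ?_⟩
    · exact PySem.List.mem_pyRange_one.mpr ⟨le_refl _, by omega⟩
    · refine List.mem_map.mpr ⟨1, ?_, rfl⟩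
      exact PySem.List.mem_pyRange_one.mpr ⟨le_refl _, by omega⟩
  exact List.ne_nil_of_mem h0

lemma pvB_eq (sweets : List Int) (h2 : 2 ≤ sweets.length) :
    calculate_invited_kids_alt sweets =
      (PySem.List.max? ((PySem.Set.ofList (pvPairSums sweets)).map
        (fun k => ((pvPairSums sweets).count k : Int))) (fun x => x)).getD 0 := by
  rw [pvAlt_def]
  set L := pvPairSums sweets with hL
  set S := PySem.List.sorted L (fun x => x) false with hS
  have hperm : S.Perm L := PySem.List.sorted_perm L (fun x => x) false
  have hpair : List.Pairwise (· ≤ ·) S := by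
    simpa using PySem.List.sorted_pairwise L (fun x => x)
  obtain ⟨hb0, hub, hex⟩ := pvScan_sorted S hpair 0 0 none (by simp) le_rfl
  have hLne : L ≠ [] := pvPairSums_ne_nil sweets h2
  have hSne : S ≠ [] := by
    intro h
    rw [h] at hperm
    exact hLne (List.Perm.eq_nil hperm.symm)
  obtain ⟨s0, hs0⟩ := List.exists_mem_of_ne_nil S hSne
  have hvne : ((PySem.Set.ofList L).map (fun k => (L.count k : Int))) ≠ [] := by
    obtain ⟨x0, hx0⟩ := List.exists_mem_of_ne_nil L hLne
    exact List.ne_nil_of_mem (List.mem_map.mpr ⟨x0, (PySem.Set.mem_ofList L x0).mpr hx0, rfl⟩)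
  cases hM : PySem.List.max? ((PySem.Set.ofList L).map (fun k => (L.count k : Int))) (fun x => x) with
  | none => exact absurd ((PySem.List.max?_eq_none_iff _ _).mp hM) hvne
  | some M =>
  obtain ⟨k0, hk0, hk0M⟩ := List.mem_map.mp (PySem.List.max?_mem hM)
  have hk0L : k0 ∈ L := (PySem.Set.mem_ofList L k0).mp hk0
  have hMub : ∀ k ∈ L, (L.count k : Int) ≤ M := by
    intro k hk
    have := PySem.List.max?_isMax hM _ (List.mem_map.mpr ⟨k, (PySem.Set.mem_ofList L k).mpr hk, rfl⟩)
    simpa [hk0M] using this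
  have hcnt : ∀ k : Int, S.count k = L.count k := fun k => hperm.count_eq k
  have hR1 : (1 : Int) ≤ (S.foldl pvRunStep (0, 0, none)).1 := by
    have hc := hub s0 hs0
    have : 1 ≤ S.count s0 := List.count_pos_iff.mpr hs0
    omega
  rcases hex with h0 | ⟨k, hkS, hkR⟩
  · omega
  · have hRM : (S.foldl pvRunStep (0, 0, none)).1 ≤ M := by
      rw [← hkR, hcnt]
      exact hMub k (hperm.mem_iff.mp hkS)
    have hMR : M ≤ (S.foldl pvRunStep (0, 0, none)).1 := by
      have := hub k0 (hperm.mem_iff.mpr hk0L)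
      rw [hcnt] at this
      omega
    simp only [Option.getD_some]
    omega

-- ===== VERDICT (by name: the statement is the Claim_ definition above) =====
theorem calculate_invited_kids_spec : Claim_equal_calculate_invited_kids := by
  intro sweets _ hpre
  unfold Spec_calculate_invited_kids
  unfold Pre_calculate_invited_kids at hpre
  rw [pvA_eq, pvB_eq sweets hpre]
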